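-- pv_equiv track=rewrite | github.com/mn-48/AlgoExpert | Graph/Graph_14_airport-connections.py | airportConnections
-- ===== SOURCE A (Python) =====
-- def airportConnections(airports, routes, startingAirport):
--     graph = { airport: [] for airport in airports }
--     for src, dest in routes:
--         graph[src].append(dest)
--
--     visited = set()
--     visitAirports(startingAirport, graph, visited)
--
--     for airport in airports:
--         if airport not in visited:
--             visitAirports(airport, graph, visited)
--             visited.remove(airport) # remove it
--
--     visited.add(startingAirport)
--     return len(airports) - len(visited)
--
-- def visitAirports(node, graph, visited):
--     if node not in visited:
--         visited.add(node)
--         for nextNode in graph[node]: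
--             visitAirports(nextNode, graph, visited)
-- ===== SOURCE B (Python) =====
-- def airportConnections(airports, routes, startingAirport):
--     graph = { airport: [] for airport in airports }
--     for src, dest in routes:
--         graph[src].append(dest)
--
--     visited = set()
--     visitAirports(startingAirport, graph, visited)
--
--     for airport in airports:
--         if airport not in visited:
--             visitAirports(airport, graph, visited)
--             visited.remove(airport)
--
--     visited.add(startingAirport)
--     return len(airports) - len(visited)
--
-- def visitAirports(node, graph, visited):
--     # iterative DFS with an explicit stack; reversed() keeps A's visiting order
--     stack = [node]
--     while stack:
--         n = stack.pop()
--         if n not in visited: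
--             visited.add(n)
--             stack.extend(reversed(graph[n]))
-- ===== Notes on version B (the rewrite author's own statement) =====
-- stated objective: alternative
-- what changed: The recursive DFS helper visitAirports is replaced by an iterative DFS with an explicit stack (pop a node, skip if visited, else mark it and push its neighbours), keeping the same outer structure; the return value only is proved equal (A additionally raises RecursionError on very deep reachable chains, which B's explicit stack avoids).
import Mathlib
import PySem

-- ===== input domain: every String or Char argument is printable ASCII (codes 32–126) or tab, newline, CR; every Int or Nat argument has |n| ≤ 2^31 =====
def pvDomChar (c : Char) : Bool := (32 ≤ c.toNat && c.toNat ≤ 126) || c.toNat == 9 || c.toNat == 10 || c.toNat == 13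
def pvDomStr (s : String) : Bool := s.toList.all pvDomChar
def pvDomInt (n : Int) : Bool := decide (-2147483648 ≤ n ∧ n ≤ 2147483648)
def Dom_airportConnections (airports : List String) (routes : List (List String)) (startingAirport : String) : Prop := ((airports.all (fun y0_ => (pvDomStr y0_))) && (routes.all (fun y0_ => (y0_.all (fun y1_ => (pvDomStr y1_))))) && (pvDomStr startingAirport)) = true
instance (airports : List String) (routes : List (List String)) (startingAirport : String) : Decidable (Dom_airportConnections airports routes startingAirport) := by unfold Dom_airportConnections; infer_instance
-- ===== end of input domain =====

-- B replaces A's recursive DFS helper by an iterative DFS with an explicit stack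
-- (same outer structure, same resulting visited set); equivalence of the RETURN VALUE is
-- proved on Pre_ (where the Python A returns; Python's recursion limit is not modelled).


-- shared helper: the graph-building lines are IDENTICAL in both Pythons, transcribed once:
-- graph = {a: [] for a in airports}; for src, dest in routes: graph[src].append(dest)
-- (a route of length ≠ 2, or with src not a key, raises in Python: outside Pre_, so the
--  fallback arms here are never reached inside Pre_)
def acGraph (airports : List String) (routes : List (List String)) : PySem.Dict String (List String) :=
  routes.foldl
    (fun gr r =>
      match r with
      | [src, dest] => gr.modify src [] (fun l => l ++ [dest])
      | _ => gr)
    (airports.foldl (fun gr a => gr.insert a []) PySem.Dict.empty)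

-- every node that can ever be marked visited beyond a seed: keys and all destinations
def acNodes (g : PySem.Dict String (List String)) : List String := g.keys ++ g.values.flatten

-- termination measure for port B's stack loop (includes the stack's own elements)
def acUnvS (g : PySem.Dict String (List String)) (V stack : List String) : Nat :=
  ((acNodes g ++ stack).toFinset.filter (fun x => x ∉ V)).card

-- fuel for port A's recursion: a totality guard only (proved sufficient below)
def acFuel (g : PySem.Dict String (List String)) : Nat := (acNodes g).toFinset.card + 1

-- a value looked up in the dict is one of its stored values (used for termination of B's loop)
theorem acMem_getD_flatten (g : PySem.Dict String (List String)) (k x : String)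
    (hx : x ∈ g.getD k []) : x ∈ g.values.flatten := by
  cases h : g.get? k with
  | none => rw [PySem.Dict.getD_of_get?_eq_none g [] h] at hx; cases hx
  | some v =>
    rw [PySem.Dict.getD_of_get?_eq_some g [] h] at hx
    have hv : v ∈ g.values := by
      have := PySem.Dict.mem_items_of_get?_eq_some (d := g) (k := k) (v := v) h
      simp only [PySem.Dict.values]
      exact List.mem_map.mpr ⟨(k, v), this, rfl⟩
    exact List.mem_flatten.mpr ⟨v, hv, hx⟩

-- termination facts for B's stack loop
theorem acUnvS_tail_le (g : PySem.Dict String (List String)) (V : List String) (n : String)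
    (rest : List String) : acUnvS g V rest ≤ acUnvS g V (n :: rest) := by
  apply Finset.card_le_card
  intro x hx
  simp only [Finset.mem_filter, List.mem_toFinset, List.mem_append, List.mem_cons] at *
  tauto

theorem acUnvS_step_lt (g : PySem.Dict String (List String)) (V : List String) (n : String)
    (rest : List String) (hnv : n ∉ V) :
    acUnvS g (PySem.Set.add V n) (g.getD n [] ++ rest) < acUnvS g V (n :: rest) := by
  apply Finset.card_lt_card
  rw [Finset.ssubset_iff_of_subset]
  · refine ⟨n, by simp [hnv], ?_⟩
    simp only [Finset.mem_filter, not_and, not_not]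
    intro _
    exact (PySem.Set.mem_add _ _ _).mpr (Or.inr rfl)
  · intro x hx
    simp only [Finset.mem_filter, List.mem_toFinset, List.mem_append, List.mem_cons] at hx ⊢
    obtain ⟨hm, hnv'⟩ := hx
    refine ⟨?_, fun hv => hnv' ((PySem.Set.mem_add _ _ _).mpr (Or.inl hv))⟩
    rcases hm with h | h | h
    · exact Or.inl h
    · refine Or.inl ?_
      unfold acNodes
      exact List.mem_append.mpr (Or.inr (acMem_getD_flatten g n x h))
    · exact Or.inr (Or.inr h)

-- ===== PORT A =====
-- visitAirports of A: recursive DFS; the for-loop over graph[node] is acVisitAListA.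
-- fuel is a totality guard only; acFuel is proved sufficient wherever the ports are compared.
mutual
def acVisitA (g : PySem.Dict String (List String)) : Nat → String → PySem.Set String → PySem.Set String
  | 0, _, visited => visited
  | fuel+1, node, visited =>
    if PySem.Set.contains visited node then visited
    else acVisitAListA g fuel (g.getD node []) (PySem.Set.add visited node)
  termination_by fuel _ _ => (fuel, 0, 0)

def acVisitAListA (g : PySem.Dict String (List String)) : Nat → List String → PySem.Set String → PySem.Set String
  | _, [], visited => visited
  | fuel, m :: ms, visited => acVisitAListA g fuel ms (acVisitA g fuel m visited)
  termination_by fuel ms _ => (fuel, 1, ms.length)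
end

def airportConnections (airports : List String) (routes : List (List String)) (startingAirport : String) : Int :=
  let g := acGraph airports routes
  let fuel := acFuel g
  let visited := acVisitA g fuel startingAirport PySem.Set.empty
  let visited := airports.foldl
    (fun v airport =>
      if PySem.Set.contains v airport then v
      else PySem.Set.discard (acVisitA g fuel airport v) airport) visited
      -- visited.remove(airport): the element is always present here, so discard = remove
  let visited := PySem.Set.add visited startingAirport
  PySem.List.len airports - PySem.Set.len visited

-- ===== PORT B =====
-- visitAirports of B: iterative DFS; the Lean list's head is the Python stack's top, so
-- stack.extend(reversed(graph[n])) followed by pops consumes g.getD n [] in order.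
def acVisitB (g : PySem.Dict String (List String)) (stack : List String) (visited : PySem.Set String) : PySem.Set String :=
  match stack with
  | [] => visited
  | n :: rest =>
    if PySem.Set.contains visited n then acVisitB g rest visited
    else acVisitB g (g.getD n [] ++ rest) (PySem.Set.add visited n)
  termination_by (acUnvS g visited stack, stack.length)
  decreasing_by
  · rcases lt_or_eq_of_le (acUnvS_tail_le g visited n rest) with h | h
    · exact Prod.Lex.left _ _ h
    · rw [h]; exact Prod.Lex.right _ (by simp)
  · have hnv : n ∉ visited := by
      simpa [PySem.Set.contains_iff] using (by assumption : ¬ PySem.Set.contains visited n = true)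
    exact Prod.Lex.left _ _ (acUnvS_step_lt g visited n rest hnv)

def airportConnections_alt (airports : List String) (routes : List (List String)) (startingAirport : String) : Int :=
  let g := acGraph airports routes
  let visited := acVisitB g [startingAirport] PySem.Set.empty
  let visited := airports.foldl
    (fun v airport =>
      if PySem.Set.contains v airport then v
      else PySem.Set.discard (acVisitB g [airport] v) airport) visited
  let visited := PySem.Set.add visited startingAirport
  PySem.List.len airports - PySem.Set.len visited

-- ===== PRECONDITION & SPEC =====
-- Pre_ excludes exactly the inputs where the Python A raises: a route that is not a pair
-- (ValueError on unpacking) or that mentions a string outside airports, or a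
-- startingAirport outside airports (KeyError on graph[...]).
def Pre_airportConnections (airports : List String) (routes : List (List String)) (startingAirport : String) : Prop :=
  (routes.all (fun r => r.length == 2 && r.all (fun x => airports.contains x))
    && airports.contains startingAirport) = true
instance (airports : List String) (routes : List (List String)) (startingAirport : String) : Decidable (Pre_airportConnections airports routes startingAirport) := by unfold Pre_airportConnections; infer_instance

def pvWitness_airportConnections : List String × List (List String) × String :=
  (["a", "b", "c"], [["a", "b"], ["c", "a"]], "a")

def Spec_airportConnections (airports : List String) (routes : List (List String)) (startingAirport : String) (out : Int) : Prop := out = airportConnections_alt airports routes startingAirport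
instance (airports : List String) (routes : List (List String)) (startingAirport : String) (out : Int) : Decidable (Spec_airportConnections airports routes startingAirport out) := by unfold Spec_airportConnections; infer_instance

-- ===== CLAIM (what is proved, stated in full; the proofs are below) =====
def Claim_equal_airportConnections : Prop := ∀ (airports : List String) (routes : List (List String)) (startingAirport : String), Dom_airportConnections airports routes startingAirport → Pre_airportConnections airports routes startingAirport → Spec_airportConnections airports routes startingAirport (airportConnections airports routes startingAirport)

-- ===== LEMMAS AND PROOFS =====

-- number of potential nodes not yet visited (drives fuel adequacy for port A)
def acUnv (g : PySem.Dict String (List String)) (V : List String) : Nat :=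
  ((acNodes g).toFinset.filter (fun x => x ∉ V)).card

-- unfolding equations stated once
theorem acVisitB_nil (g : PySem.Dict String (List String)) (V : PySem.Set String) :
    acVisitB g [] V = V := by
  rw [acVisitB]

theorem acVisitB_cons (g : PySem.Dict String (List String)) (n : String) (rest : List String)
    (V : PySem.Set String) :
    acVisitB g (n :: rest) V =
      if PySem.Set.contains V n then acVisitB g rest V
      else acVisitB g (g.getD n [] ++ rest) (PySem.Set.add V n) := by
  rw [acVisitB]

-- unvisited count is antitone in the visited set
theorem acUnv_le_of_subset (g : PySem.Dict String (List String)) {V W : List String}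
    (h : ∀ x, x ∈ V → x ∈ W) : acUnv g W ≤ acUnv g V := by
  apply Finset.card_le_card
  intro x hx
  simp only [Finset.mem_filter] at *
  exact ⟨hx.1, fun hv => hx.2 (h x hv)⟩

-- marking a known node strictly shrinks the unvisited count
theorem acUnv_add_lt (g : PySem.Dict String (List String)) {V : List String} {n : String}
    (hn : n ∈ acNodes g) (hnv : n ∉ V) : acUnv g (PySem.Set.add V n) < acUnv g V := by
  apply Finset.card_lt_card
  rw [Finset.ssubset_iff_of_subset]
  · refine ⟨n, by simp only [Finset.mem_filter, List.mem_toFinset]; exact ⟨hn, hnv⟩, ?_⟩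
    simp only [Finset.mem_filter, not_and, not_not]
    intro _
    exact (PySem.Set.mem_add _ _ _).mpr (Or.inr rfl)
  · intro x hx
    simp only [Finset.mem_filter, PySem.Set.mem_add] at *
    exact ⟨hx.1, fun hv => hx.2 (Or.inl hv)⟩

-- the chosen fuel dominates every unvisited count
theorem acUnv_lt_fuel (g : PySem.Dict String (List String)) (V : List String) :
    acUnv g V < acFuel g := by
  have := Finset.card_filter_le (acNodes g).toFinset (fun x => x ∉ V)
  unfold acUnv acFuel
  omega

-- the stack loop only adds elements
theorem acVisitB_mono (g : PySem.Dict String (List String)) (stack : List String)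
    (V : PySem.Set String) : ∀ x ∈ V, x ∈ acVisitB g stack V := by
  fun_induction acVisitB g stack V with
  | case1 => exact fun x hx => hx
  | case2 V n rest hc ih => exact ih
  | case3 V n rest hc ih => exact fun x hx => ih x ((PySem.Set.mem_add _ _ _).mpr (Or.inl hx))

-- the stack loop consumes a concatenated stack in two stages
theorem acVisitB_append (g : PySem.Dict String (List String)) (ns rest : List String)
    (V : PySem.Set String) :
    acVisitB g (ns ++ rest) V = acVisitB g rest (acVisitB g ns V) := by
  fun_induction acVisitB g ns V with
  | case1 => rw [List.nil_append]
  | case2 V n ns' hc ih => rw [List.cons_append, acVisitB_cons, if_pos hc]; exact ih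
  | case3 V n ns' hc ih => rw [List.cons_append, acVisitB_cons, if_neg hc, ← List.append_assoc]; exact ih

-- keys of the graph are among its potential nodes
theorem acNotNodes_getD (g : PySem.Dict String (List String)) {n : String}
    (hn : n ∉ acNodes g) : g.getD n [] = [] := by
  apply PySem.Dict.getD_of_not_contains
  by_contra hc
  simp only [Bool.not_eq_false] at hc
  exact hn (List.mem_append.mpr (Or.inl ((PySem.Dict.contains_iff_mem_keys g n).mp hc)))

-- with adequate fuel, A's for-loop of recursive DFS calls is B's stack loop
theorem acVisitAListA_eq_B (g : PySem.Dict String (List String)) (fuel : Nat)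
    (hP : ∀ n V, acUnv g V < fuel → acVisitA g fuel n V = acVisitB g [n] V) :
    ∀ ms V, acUnv g V < fuel → acVisitAListA g fuel ms V = acVisitB g ms V := by
  intro ms
  induction ms with
  | nil => intro V h; rw [acVisitAListA, acVisitB_nil]
  | cons m ms ih =>
    intro V h
    rw [acVisitAListA, hP m V h]
    have hsub : acUnv g (acVisitB g [m] V) ≤ acUnv g V :=
      acUnv_le_of_subset g (fun x hx => acVisitB_mono g [m] V x hx)
    rw [ih _ (by omega)]
    have := acVisitB_append g [m] ms V
    rw [← this]
    rfl

-- with adequate fuel, A's recursive DFS and B's stack DFS build the SAME visited list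
theorem acVisitA_eq_B (g : PySem.Dict String (List String)) :
    ∀ fuel n V, acUnv g V < fuel → acVisitA g fuel n V = acVisitB g [n] V := by
  intro fuel
  induction fuel with
  | zero => intro n V h; omega
  | succ f ih =>
    intro n V h
    rw [acVisitA, acVisitB_cons]
    by_cases hc : PySem.Set.contains V n
    · rw [if_pos hc, if_pos hc, acVisitB_nil]
    · rw [if_neg hc, if_neg hc, List.append_nil]
      have hnv : n ∉ V := by simpa [PySem.Set.contains_iff] using hc
      by_cases hn : n ∈ acNodes g
      · exact acVisitAListA_eq_B g f ih (g.getD n []) (PySem.Set.add V n)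
          (by have := acUnv_add_lt g hn hnv; omega)
      · rw [acNotNodes_getD g hn, acVisitAListA, acVisitB_nil]

-- ===== VERDICT (by name: the statement is the Claim_ definition above) =====
theorem airportConnections_spec : Claim_equal_airportConnections := by
  intro airports routes startingAirport _hdom _hpre
  unfold Spec_airportConnections airportConnections airportConnections_alt
  have hv : ∀ n V, acVisitA (acGraph airports routes) (acFuel (acGraph airports routes)) n V
      = acVisitB (acGraph airports routes) [n] V :=
    fun n V => acVisitA_eq_B _ _ n V (acUnv_lt_fuel _ _)
  simp only [hv]
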